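-- pv_equiv track=rewrite | github.com/sanket-sakariya/newsbreak-scrapping-service | app/core/workers.py | filter_unwanted_urls
-- ===== SOURCE A (Python) =====
-- from typing import List, Optional, Dict, Tuple
--
-- def filter_unwanted_urls(urls: List[str]) -> List[str]:
--     """Filter out unwanted URLs"""
--     filtered_urls = []
--
--     unwanted_patterns = [
--         '/ads/', '/redirect/', 'javascript:', 'mailto:', 'tel:',
--         '#', '?utm_', '/login', '/register', '/subscribe',
--         '/privacy', '/terms', '/api/', '/static/', '/css/',
--         '/js/', '/images/', '/favicon'
--     ]
--
--     for url in urls: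
--         if not any(pattern in url.lower() for pattern in unwanted_patterns):
--             filtered_urls.append(url)
--
--     return filtered_urls
-- ===== SOURCE B (Python) =====
-- def filter_unwanted_urls(urls):
--     """Filter out unwanted URLs (single left-to-right scan, prefix-matching all
--     patterns at each position, instead of one full substring search per pattern)."""
--     unwanted_patterns = [
--         '/ads/', '/redirect/', 'javascript:', 'mailto:', 'tel:',
--         '#', '?utm_', '/login', '/register', '/subscribe',
--         '/privacy', '/terms', '/api/', '/static/', '/css/',
--         '/js/', '/images/', '/favicon'
--     ]
--
--     def is_bad(s):
--         for i in range(len(s) + 1):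
--             for p in unwanted_patterns:
--                 if s.startswith(p, i):
--                     return True
--         return False
--
--     return [url for url in urls if not is_bad(url.lower())]
-- ===== Notes on version B (the rewrite author's own statement) =====
-- stated objective: alternative
-- what changed: A asks 'pattern in url.lower()' separately for each of the 17 patterns (pattern-major: up to 17 substring searches and lowercase conversions per URL); B lowercases each URL once and makes a single position-major left-to-right pass, checking at every position whether any pattern starts there, collecting survivors with a comprehension instead of an append loop.
import Mathlib
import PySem

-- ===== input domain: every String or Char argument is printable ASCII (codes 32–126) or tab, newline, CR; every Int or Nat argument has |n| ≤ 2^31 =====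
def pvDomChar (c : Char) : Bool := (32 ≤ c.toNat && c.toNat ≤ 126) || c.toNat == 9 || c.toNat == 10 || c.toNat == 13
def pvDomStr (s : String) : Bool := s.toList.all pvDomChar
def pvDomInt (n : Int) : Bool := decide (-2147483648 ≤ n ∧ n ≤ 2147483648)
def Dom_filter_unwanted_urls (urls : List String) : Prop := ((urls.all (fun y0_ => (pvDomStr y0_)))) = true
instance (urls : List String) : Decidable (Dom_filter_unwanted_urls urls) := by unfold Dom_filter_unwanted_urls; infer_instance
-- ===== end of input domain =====

-- ===== PORT A =====
-- B differs from A only in the matching mechanism (one position-major scan vs. per-pattern substring tests); objective: alternative.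
def unwantedPatterns : List String :=
  ["/ads/", "/redirect/", "javascript:", "mailto:", "tel:",
   "#", "?utm_", "/login", "/register", "/subscribe",
   "/privacy", "/terms", "/api/", "/static/", "/css/",
   "/js/", "/images/", "/favicon"]

def filter_unwanted_urls (urls : List String) : List String :=
  urls.foldl (fun filtered_urls url =>
    if !(unwantedPatterns.any fun pattern => PySem.Str.isIn pattern (PySem.Str.lower url)) then
      filtered_urls ++ [url]
    else filtered_urls) []

-- ===== PORT B =====
-- is_bad: at each position of the (already lowered) string, does some pattern start there?
def badScan (pats : List (List Char)) : List Char → Bool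
  | [] => pats.any (fun p => p.isPrefixOf ([] : List Char))
  | c :: t => (pats.any fun p => p.isPrefixOf (c :: t)) || badScan pats t

def filter_unwanted_urls_alt (urls : List String) : List String :=
  urls.filter fun url => !(badScan (unwantedPatterns.map String.toList) (PySem.Chars.lower url.toList))

-- ===== PRECONDITION & SPEC =====
def Spec_filter_unwanted_urls (urls : List String) (out : List String) : Prop := out = filter_unwanted_urls_alt urls
instance (urls : List String) (out : List String) : Decidable (Spec_filter_unwanted_urls urls out) := by unfold Spec_filter_unwanted_urls; infer_instance

-- ===== CLAIM (what is proved, stated in full; the proofs are below) =====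
def Claim_equal_filter_unwanted_urls : Prop := ∀ (urls : List String), Dom_filter_unwanted_urls urls → Spec_filter_unwanted_urls urls (filter_unwanted_urls urls)

-- ===== LEMMAS AND PROOFS =====
lemma badScan_true_iff (pats : List (List Char)) (s : List Char) :
    badScan pats s = true ↔ ∃ p ∈ pats, p <:+: s := by
  induction s with
  | nil => simp [badScan, List.any_eq_true, List.isPrefixOf_iff_prefix]
  | cons c t ih =>
    simp only [badScan, Bool.or_eq_true, List.any_eq_true, List.isPrefixOf_iff_prefix, ih,
      List.infix_cons_iff]
    aesop

lemma bad_pred_eq (url : String) :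
    (unwantedPatterns.any fun pattern => PySem.Str.isIn pattern (PySem.Str.lower url))
      = badScan (unwantedPatterns.map String.toList) (PySem.Chars.lower url.toList) := by
  rw [Bool.eq_iff_iff, badScan_true_iff]
  simp [List.any_eq_true, PySem.Chars.isIn_iff_infix]

-- ===== VERDICT (by name: the statement is the Claim_ definition above) =====
theorem filter_unwanted_urls_spec : Claim_equal_filter_unwanted_urls := by
  intro urls _
  show filter_unwanted_urls urls = filter_unwanted_urls_alt urls
  unfold filter_unwanted_urls filter_unwanted_urls_alt
  rw [PySem.List.foldl_append_if_eq_filter]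
  simp only [List.nil_append]
  exact List.filter_congr fun url _ => by rw [bad_pred_eq]
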